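-- pv_equiv track=rewrite | github.com/tugraskan/swatplus_ug | automation/src/validator.py | _extract_parameter_data
-- ===== SOURCE A (Python) =====
-- from typing import Dict, List, Any, Optional, Tuple
--
-- def _extract_parameter_data(csv_data: List[List[str]]) -> List[Dict[str, str]]:
--     """Extract parameter data from CSV rows."""
--     parameters = []
--
--     # Find header row
--     header_row = None
--     for i, row in enumerate(csv_data):
--         if row and 'DATABASE_FIELD_NAME' in row:
--             header_row = i
--             break
--
--     if header_row is None:
--         return parameters
--
--     header = csv_data[header_row]
--
--     # Extract data rows
--     for row in csv_data[header_row + 1:]: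
--         if row and not row[0].startswith('#') and len(row) >= len(header):
--             param_dict = {}
--             for i, value in enumerate(row):
--                 if i < len(header):
--                     param_dict[header[i].lower().replace(' ', '_')] = value
--
--             # Extract key fields
--             param = {
--                 'field_name': param_dict.get('database_field_name', ''),
--                 'description': param_dict.get('description', ''),
--                 'units': param_dict.get('units', ''),
--                 'data_type': param_dict.get('data_type', ''),
--                 'default_value': param_dict.get('default_value', '')
--             }
--
--             if param['field_name']:
--                 parameters.append(param)
--
--     return parameters
-- ===== SOURCE B (Python) =====
-- def _extract_parameter_data(csv_data):
--     """Extract parameter data from CSV rows (column-index table instead of per-row dicts)."""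
--     header_row = None
--     for i, row in enumerate(csv_data):
--         if row and 'DATABASE_FIELD_NAME' in row:
--             header_row = i
--             break
--     if header_row is None:
--         return []
--
--     header = csv_data[header_row]
--     targets = ('database_field_name', 'description', 'units',
--                'data_type', 'default_value')
--     # map each target normalized name to its LAST column (last-wins, like a dict)
--     col = {}
--     for i, name in enumerate(header):
--         n = name.lower().replace(' ', '_')
--         if n in targets:
--             col[n] = i
--
--     out_keys = ('field_name', 'description', 'units', 'data_type', 'default_value')
--     parameters = []
--     for row in csv_data[header_row + 1:]:
--         if row and not row[0].startswith('#') and len(row) >= len(header):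
--             values = [row[col[t]] if t in col else '' for t in targets]
--             if values[0]:
--                 parameters.append(dict(zip(out_keys, values)))
--     return parameters
-- ===== Notes on version B (the rewrite author's own statement) =====
-- stated objective: simpler
-- what changed: Instead of rebuilding a normalized-header->value dict for every data row, B scans the header once to build a small target-name->column-index table (last occurrence wins) and then reads each of the five fields directly from each row by index.
import Mathlib
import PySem

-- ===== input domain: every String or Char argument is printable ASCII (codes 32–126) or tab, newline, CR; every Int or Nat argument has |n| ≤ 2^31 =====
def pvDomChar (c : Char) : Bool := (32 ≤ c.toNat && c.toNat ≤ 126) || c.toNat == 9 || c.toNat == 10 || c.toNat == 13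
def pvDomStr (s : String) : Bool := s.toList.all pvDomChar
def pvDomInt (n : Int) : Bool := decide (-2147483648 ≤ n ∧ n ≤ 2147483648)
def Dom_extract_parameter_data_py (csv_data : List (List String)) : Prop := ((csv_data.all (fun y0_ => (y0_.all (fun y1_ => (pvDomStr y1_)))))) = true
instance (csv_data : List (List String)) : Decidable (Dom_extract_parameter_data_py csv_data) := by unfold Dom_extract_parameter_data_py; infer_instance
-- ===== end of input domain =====

-- B replaces A's per-row normalized-header dict by a single target-name -> column-index
-- table built once from the header (simpler decomposition; same return value).

-- shared by both ports (both Pythons contain these lines verbatim):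
-- header[i].lower().replace(' ', '_')
def pvNormKey (s : String) : String := PySem.Str.replace (PySem.Str.lower s) " " "_"

-- 'for i, row in enumerate(csv_data): if row and 'DATABASE_FIELD_NAME' in row: header_row = i; break'
def pvFindHeader : List (List String) → Nat → Option Nat
  | [], _ => none
  | r :: rs, i =>
    if !r.isEmpty && r.contains "DATABASE_FIELD_NAME" then some i else pvFindHeader rs (i + 1)

-- ===== PORT A =====
-- 'for i, value in enumerate(row): if i < len(header): param_dict[header[i].lower()...] = value'
def pvBuildParamDict (header : List String) :
    List String → Nat → PySem.Dict String String → PySem.Dict String String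
  | [], _, d => d
  | v :: vs, i, d =>
    pvBuildParamDict header vs (i + 1)
      (if i < header.length then
        d.insert (pvNormKey (PySem.List.pyGetD header (i : Int) "")) v
      else d)

def extract_parameter_data_py (csv_data : List (List String)) : List (List (String × String)) :=
  match pvFindHeader csv_data 0 with
  | none => []
  | some h =>
    let header := PySem.List.pyGetD csv_data (h : Int) []   -- csv_data[header_row], in range
    (csv_data.drop (h + 1)).foldl (fun acc row =>           -- csv_data[header_row+1:] (nonneg slice = drop)
      if row ≠ [] ∧ ¬ PySem.Str.startswith (PySem.List.pyGetD row 0 "") "#"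
          ∧ header.length ≤ row.length then
        let d := pvBuildParamDict header row 0 PySem.Dict.empty
        let param : List (String × String) :=
          [("field_name", d.getD "database_field_name" ""),
           ("description", d.getD "description" ""),
           ("units", d.getD "units" ""),
           ("data_type", d.getD "data_type" ""),
           ("default_value", d.getD "default_value" "")]
        if d.getD "database_field_name" "" ≠ "" then acc ++ [param] else acc
      else acc) []

-- ===== PORT B =====
def pvTargets : List String :=
  ["database_field_name", "description", "units", "data_type", "default_value"]

-- 'for i, name in enumerate(header): n = norm(name); if n in targets: col[n] = i'
def pvBuildIdx : List String → Nat → PySem.Dict String Nat → PySem.Dict String Nat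
  | [], _, d => d
  | h :: hs, i, d =>
    pvBuildIdx hs (i + 1)
      (if pvTargets.contains (pvNormKey h) then d.insert (pvNormKey h) i else d)

-- 'row[col[t]] if t in col else '''  (index in range thanks to the len guard)
def pvColVal (col : PySem.Dict String Nat) (row : List String) (t : String) : String :=
  match col.get? t with
  | some i => PySem.List.pyGetD row (i : Int) ""
  | none => ""

def extract_parameter_data_py_alt (csv_data : List (List String)) : List (List (String × String)) :=
  match pvFindHeader csv_data 0 with
  | none => []
  | some h =>
    let header := PySem.List.pyGetD csv_data (h : Int) []
    let col := pvBuildIdx header 0 PySem.Dict.empty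
    (csv_data.drop (h + 1)).foldl (fun acc row =>
      if row ≠ [] ∧ ¬ PySem.Str.startswith (PySem.List.pyGetD row 0 "") "#"
          ∧ header.length ≤ row.length then
        let values := pvTargets.map (pvColVal col row)
        if PySem.List.pyGetD values 0 "" ≠ "" then
          acc ++ [(["field_name", "description", "units", "data_type", "default_value"]).zip values]
        else acc
      else acc) []

-- ===== PRECONDITION & SPEC =====
def Spec_extract_parameter_data_py (csv_data : List (List String)) (out : List (List (String × String))) : Prop := out = extract_parameter_data_py_alt csv_data
instance (csv_data : List (List String)) (out : List (List (String × String))) : Decidable (Spec_extract_parameter_data_py csv_data out) := by unfold Spec_extract_parameter_data_py; infer_instance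

-- ===== CLAIM (what is proved, stated in full; the proofs are below) =====
def Claim_equal_extract_parameter_data_py : Prop := ∀ (csv_data : List (List String)), Dom_extract_parameter_data_py csv_data → Spec_extract_parameter_data_py csv_data (extract_parameter_data_py csv_data)

-- ===== LEMMAS AND PROOFS =====
set_option maxHeartbeats 1000000

-- last column index (≥ i) whose normalized header name is t
def pvLast (t : String) : List String → Nat → Option Nat
  | [], _ => none
  | h :: hs, i => (pvLast t hs (i + 1)).or (if pvNormKey h = t then some i else none)

-- last value written under key t by A's per-row loop (vs at absolute offset i)
def pvLastV (header : List String) (t : String) : List String → Nat → Option String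
  | [], _ => none
  | v :: vs, i =>
    (pvLastV header t vs (i + 1)).or
      (if i < header.length ∧ pvNormKey (PySem.List.pyGetD header (i : Int) "") = t then some v
       else none)

theorem pvMapOr {α β : Type} (f : α → β) (a b : Option α) :
    (a.or b).map f = (a.map f).or (b.map f) := by cases a <;> rfl

theorem pvLast_ge {t : String} : ∀ (hs : List String) (i j : Nat),
    pvLast t hs i = some j → i ≤ j := by
  intro hs
  induction hs with
  | nil => intro i j h; simp [pvLast] at h
  | cons h hs ih =>
    intro i j hj
    simp only [pvLast] at hj
    cases hrec : pvLast t hs (i + 1) with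
    | some k => rw [hrec] at hj; simp [Option.or] at hj; subst hj
                have := ih (i + 1) k hrec; omega
    | none => rw [hrec] at hj; simp [Option.or] at hj
              obtain ⟨-, rfl⟩ := hj; omega

theorem pvBuildParamDict_getD (header : List String) (t : String) :
    ∀ (vs : List String) (i : Nat) (d : PySem.Dict String String),
    (pvBuildParamDict header vs i d).getD t "" = (pvLastV header t vs i).getD (d.getD t "") := by
  intro vs
  induction vs with
  | nil => intro i d; simp [pvBuildParamDict, pvLastV]
  | cons v vs ih =>
    intro i d
    simp only [pvBuildParamDict, pvLastV]
    rw [ih]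
    cases hrec : pvLastV header t vs (i + 1) with
    | some w => simp [Option.or]
    | none =>
      simp only [Option.or, Option.getD]
      by_cases hi : i < header.length
      · simp only [hi, if_true, true_and]
        rw [PySem.Dict.getD_insert]
        by_cases ht : pvNormKey (PySem.List.pyGetD header (i : Int) "") = t
        · rw [if_pos ht.symm, if_pos ht]
        · rw [if_neg (fun hh => ht hh.symm), if_neg ht]
      · simp [hi]

theorem pvBuildIdx_get? (t : String) (ht : t ∈ pvTargets) :
    ∀ (hs : List String) (i : Nat) (d : PySem.Dict String Nat),
    (pvBuildIdx hs i d).get? t = (pvLast t hs i).or (d.get? t) := by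
  intro hs
  induction hs with
  | nil => intro i d; simp [pvBuildIdx, pvLast]
  | cons h hs ih =>
    intro i d
    simp only [pvBuildIdx, pvLast]
    rw [ih, Option.or_assoc]
    have step : (if pvTargets.contains (pvNormKey h) = true then d.insert (pvNormKey h) i else d).get? t
        = (if pvNormKey h = t then some i else none).or (d.get? t) := by
      by_cases he : pvNormKey h = t
      · have hc : pvTargets.contains (pvNormKey h) = true := by
          rw [he]; exact List.contains_iff_mem.mpr ht
        rw [if_pos hc, PySem.Dict.get?_insert, if_pos he.symm, if_pos he]
        rfl
      · rw [if_neg he]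
        by_cases hc : pvTargets.contains (pvNormKey h) = true
        · rw [if_pos hc, PySem.Dict.get?_insert, if_neg (fun hh => he hh.symm)]
          rfl
        · rw [if_neg hc]
          rfl
    rw [step]

theorem pvBridge (header : List String) (t : String) :
    ∀ (vs : List String) (i : Nat), header.length ≤ i + vs.length →
    pvLastV header t vs i = (pvLast t (header.drop i) i).map (fun j => vs.getD (j - i) "") := by
  intro vs
  induction vs with
  | nil =>
    intro i hlen
    simp only [List.length_nil, Nat.add_zero] at hlen
    have hd : header.drop i = [] := List.drop_eq_nil_of_le hlen
    simp [pvLastV, hd, pvLast]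
  | cons v vs ih =>
    intro i hlen
    simp only [List.length_cons] at hlen
    by_cases hi : i < header.length
    · have hdrop : header.drop i = header[i] :: header.drop (i + 1) :=
        List.drop_eq_getElem_cons hi
      have e : PySem.List.pyGetD header (i : Int) "" = header[i] := by
        simp [List.getElem?_eq_getElem hi]
      simp only [pvLastV, hdrop, pvLast]
      rw [ih (i + 1) (by omega), pvMapOr]
      congr 1
      · cases hrec : pvLast t (header.drop (i + 1)) (i + 1) with
        | none => simp
        | some j =>
          have hj : i + 1 ≤ j := pvLast_ge _ _ _ hrec
          simp only [Option.map_some]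
          congr 1
          have h1 : j - i = (j - (i + 1)) + 1 := by omega
          rw [h1, List.getD_cons_succ]
      · rw [e]
        by_cases ht : pvNormKey header[i] = t
        · simp [hi, ht]
        · simp [hi, ht]
    · have hdrop : header.drop i = [] := List.drop_eq_nil_of_le (by omega)
      have hdrop1 : header.drop (i + 1) = [] := List.drop_eq_nil_of_le (by omega)
      simp only [pvLastV, hdrop, pvLast]
      rw [ih (i + 1) (by omega)]
      simp [hdrop1, pvLast, hi]

-- per-key agreement between A's per-row dict and B's column table
theorem pvKey_eq (header row : List String) (t : String) (ht : t ∈ pvTargets)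
    (hlen : header.length ≤ row.length) :
    (pvBuildParamDict header row 0 PySem.Dict.empty).getD t ""
      = pvColVal (pvBuildIdx header 0 PySem.Dict.empty) row t := by
  rw [pvBuildParamDict_getD, pvBridge header t row 0 (by omega)]
  unfold pvColVal
  rw [pvBuildIdx_get? t ht]
  simp only [List.drop_zero, PySem.Dict.get?_empty, Option.or_none, PySem.Dict.getD_empty]
  cases hrec : pvLast t header 0 with
  | none => simp
  | some j =>
    simp only [Option.map_some, Option.getD_some, Nat.sub_zero]
    simp [PySem.List.pyGetD_natCast]

theorem pvFoldl_ext {α β : Type} (f g : β → α → β) (h : ∀ b a, f b a = g b a) :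
    ∀ (l : List α) (b : β), l.foldl f b = l.foldl g b := by
  have : f = g := funext fun b => funext fun a => h b a
  intro l b; rw [this]

-- the two per-row loop bodies agree
theorem pvBody_eq (header : List String) (acc : List (List (String × String))) (row : List String) :
    (if row ≠ [] ∧ ¬ PySem.Str.startswith (PySem.List.pyGetD row 0 "") "#"
        ∧ header.length ≤ row.length then
      let d := pvBuildParamDict header row 0 PySem.Dict.empty
      let param : List (String × String) :=
        [("field_name", d.getD "database_field_name" ""),
         ("description", d.getD "description" ""),
         ("units", d.getD "units" ""),
         ("data_type", d.getD "data_type" ""),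
         ("default_value", d.getD "default_value" "")]
      if d.getD "database_field_name" "" ≠ "" then acc ++ [param] else acc
    else acc)
    = (if row ≠ [] ∧ ¬ PySem.Str.startswith (PySem.List.pyGetD row 0 "") "#"
        ∧ header.length ≤ row.length then
      let values := pvTargets.map (pvColVal (pvBuildIdx header 0 PySem.Dict.empty) row)
      if PySem.List.pyGetD values 0 "" ≠ "" then
        acc ++ [(["field_name", "description", "units", "data_type", "default_value"]).zip values]
      else acc
    else acc) := by
  by_cases hg : row ≠ [] ∧ ¬ PySem.Str.startswith (PySem.List.pyGetD row 0 "") "#"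
      ∧ header.length ≤ row.length
  · rw [if_pos hg, if_pos hg]
    have hlen : header.length ≤ row.length := hg.2.2
    have h1 := pvKey_eq header row "database_field_name" (by simp [pvTargets]) hlen
    have h2 := pvKey_eq header row "description" (by simp [pvTargets]) hlen
    have h3 := pvKey_eq header row "units" (by simp [pvTargets]) hlen
    have h4 := pvKey_eq header row "data_type" (by simp [pvTargets]) hlen
    have h5 := pvKey_eq header row "default_value" (by simp [pvTargets]) hlen
    simp only [pvTargets, List.map_cons, List.map_nil, PySem.List.pyGetD_zero_cons,
      List.zip_cons_cons, List.zip_nil_right]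
    rw [h1, h2, h3, h4, h5]
  · rw [if_neg hg, if_neg hg]

-- ===== VERDICT (by name: the statement is the Claim_ definition above) =====
theorem extract_parameter_data_py_spec : Claim_equal_extract_parameter_data_py := by
  intro csv_data _
  unfold Spec_extract_parameter_data_py extract_parameter_data_py extract_parameter_data_py_alt
  cases pvFindHeader csv_data 0 with
  | none => rfl
  | some h =>
    exact pvFoldl_ext _ _
      (fun acc row => pvBody_eq (PySem.List.pyGetD csv_data (h : Int) []) acc row) _ _
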